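-- pv_equiv track=rewrite | github.com/BruningLab/warpDOCK | FetchResults.py | get_affinity
-- ===== SOURCE A (Python) =====
-- def get_affinity(inline):
--     rt_affi = ""
--     max_affi = inline.split(" ")
--     for affi in max_affi:
--         if "-" in affi:
--             rt_affi = affi
--         else:
--             continue
--     return rt_affi
-- ===== SOURCE B (Python) =====
-- def get_affinity(inline):
--     i = inline.rfind("-")
--     if i == -1:
--         return ""
--     start = inline.rfind(" ", 0, i) + 1
--     end = inline.find(" ", i)
--     if end == -1:
--         return inline[start:]
--     return inline[start:end]
-- ===== Notes on version B (the rewrite author's own statement) =====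
-- stated objective: alternative
-- what changed: B never iterates over the split tokens: it locates the last dash with rfind and cuts the surrounding token out of the string directly via two boundary searches (rfind of the space before it, find of the space after it) and one slice.
import Mathlib
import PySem

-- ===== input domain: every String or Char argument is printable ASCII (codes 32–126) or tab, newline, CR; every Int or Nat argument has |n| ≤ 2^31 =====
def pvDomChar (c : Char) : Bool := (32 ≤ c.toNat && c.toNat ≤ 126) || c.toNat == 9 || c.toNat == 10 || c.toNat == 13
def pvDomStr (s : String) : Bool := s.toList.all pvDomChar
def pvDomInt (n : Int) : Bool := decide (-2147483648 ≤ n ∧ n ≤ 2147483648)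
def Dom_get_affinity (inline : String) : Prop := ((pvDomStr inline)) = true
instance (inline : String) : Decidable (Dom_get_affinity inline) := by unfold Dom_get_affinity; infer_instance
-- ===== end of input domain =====

-- B replaces A's loop over the space-split tokens by direct substring searches: rfind the last
-- dash and slice the surrounding token out between the neighbouring spaces (objective: alternative).

-- ===== PORT A =====
-- forward loop over the space-split tokens: rt_affi starts empty, each dash-containing token overwrites it
def get_affinity (inline : String) : String :=
  String.mk ((PySem.Chars.splitOn inline.toList [' ']).foldl
    (fun rt_affi affi => if PySem.Chars.isIn ['-'] affi then affi else rt_affi) [])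

-- ===== PORT B =====
-- i = index of last dash via rfind; if -1 return the empty string; start = rfind of space before i, plus 1;
-- end = find of space from i; return the slice inline[start:] if end == -1 else inline[start:end]
def get_affinity_alt (inline : String) : String :=
  let cs := inline.toList
  let i := PySem.Chars.rfind cs ['-']
  if i = -1 then ""
  else
    let start := PySem.Chars.rfindFrom cs [' '] 0 (some i) + 1
    let stop := PySem.Chars.findFrom cs [' '] i none
    if stop = -1 then String.mk (PySem.Chars.slice cs (some start) none)
    else String.mk (PySem.Chars.slice cs (some start) (some stop))

-- ===== PRECONDITION & SPEC =====
def Spec_get_affinity (inline : String) (out : String) : Prop := out = get_affinity_alt inline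
instance (inline : String) (out : String) : Decidable (Spec_get_affinity inline out) := by unfold Spec_get_affinity; infer_instance

-- ===== CLAIM (what is proved, stated in full; the proofs are below) =====
def Claim_equal_get_affinity : Prop := ∀ (inline : String), Dom_get_affinity inline → Spec_get_affinity inline (get_affinity inline)

-- ===== LEMMAS AND PROOFS =====

-- ---- generic singleton-pattern facts ----
theorem pv_prefix_singleton (c : Char) (l : List Char) : [c] <+: l ↔ l.head? = some c := by
  cases l <;> simp [List.cons_prefix_cons, eq_comm]

theorem pv_infix_singleton (c : Char) (s : List Char) : [c] <:+: s ↔ c ∈ s := by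
  constructor
  · intro h; exact (List.singleton_sublist).1 h.sublist
  · intro h; obtain ⟨p, q, rfl⟩ := List.append_of_mem h; exact ⟨p, q, by simp⟩

theorem pv_isIn_singleton (c : Char) (s : List Char) :
    PySem.Chars.isIn [c] s = true ↔ c ∈ s := by
  rw [PySem.Chars.isIn_iff_infix, pv_infix_singleton]

theorem pv_isPrefixOf_drop (c : Char) (s : List Char) (j : Nat) :
    [c].isPrefixOf (s.drop j) = true ↔ s[j]? = some c := by
  rw [List.isPrefixOf_iff_prefix, pv_prefix_singleton, List.head?_drop]

-- ---- split(" ") characterisation ----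
def pvSplit1 : List Char → List (List Char)
  | [] => [[]]
  | c :: rest => if c = ' ' then [] :: pvSplit1 rest else (pvSplit1 rest).modifyHead (c :: ·)

theorem pvSplit1_ne_nil (cs : List Char) : pvSplit1 cs ≠ [] := by
  induction cs with
  | nil => simp [pvSplit1]
  | cons c rest ih =>
      simp only [pvSplit1]
      split
      · simp
      · cases h : pvSplit1 rest with
        | nil => exact absurd h ih
        | cons a l => simp

theorem pv_splitOn_go (fuel : Nat) : ∀ (l cur : List Char) (acc : List (List Char)),
    l.length < fuel →
    PySem.Chars.splitOn.go [' '] fuel l cur acc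
      = acc.reverse ++ (pvSplit1 l).modifyHead (cur.reverse ++ ·) := by
  induction fuel with
  | zero => intro l cur acc h; omega
  | succ fuel ih =>
      intro l cur acc h
      cases l with
      | nil => simp [PySem.Chars.splitOn.go, pvSplit1]
      | cons c rest =>
          by_cases hc : c = ' '
          · subst hc
            have : PySem.Chars.splitOn.go [' '] (fuel+1) (' ' :: rest) cur acc
                = PySem.Chars.splitOn.go [' '] fuel rest [] (cur.reverse :: acc) := by
              simp [PySem.Chars.splitOn.go, List.isPrefixOf]
            rw [this, ih rest [] _ (by simpa using Nat.lt_of_succ_lt_succ h)]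
            obtain ⟨a, tl, hs⟩ : ∃ a tl, pvSplit1 rest = a :: tl := by
              cases hps : pvSplit1 rest with
              | nil => exact absurd hps (pvSplit1_ne_nil rest)
              | cons a tl => exact ⟨a, tl, rfl⟩
            simp [pvSplit1, hs]
          · have hc' : ¬ (' ' = c) := fun h => hc h.symm
            have : PySem.Chars.splitOn.go [' '] (fuel+1) (c :: rest) cur acc
                = PySem.Chars.splitOn.go [' '] fuel rest (c :: cur) acc := by
              simp [PySem.Chars.splitOn.go, List.isPrefixOf, hc']
            rw [this, ih rest (c :: cur) _ (by simpa using Nat.lt_of_succ_lt_succ h)]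
            obtain ⟨a, tl, hs⟩ : ∃ a tl, pvSplit1 rest = a :: tl := by
              cases hps : pvSplit1 rest with
              | nil => exact absurd hps (pvSplit1_ne_nil rest)
              | cons a tl => exact ⟨a, tl, rfl⟩
            simp [pvSplit1, hc, hs]

theorem pv_splitOn_eq (cs : List Char) : PySem.Chars.splitOn cs [' '] = pvSplit1 cs := by
  have h := pv_splitOn_go (cs.length + 1) cs [] [] (by omega)
  simp only [PySem.Chars.splitOn] at *
  rw [h]
  obtain ⟨a, tl, hs⟩ : ∃ a tl, pvSplit1 cs = a :: tl := by
    cases hps : pvSplit1 cs with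
    | nil => exact absurd hps (pvSplit1_ne_nil cs)
    | cons a tl => exact ⟨a, tl, rfl⟩
  simp [hs]

theorem pvSplit1_no_sep (cs : List Char) (h : ' ' ∉ cs) : pvSplit1 cs = [cs] := by
  induction cs with
  | nil => rfl
  | cons c rest ih =>
      have hc : ¬ c = ' ' := by intro hc; exact h (by simp [hc])
      simp [pvSplit1, hc, ih (by intro hm; exact h (by simp [hm]))]

theorem pvSplit1_append_sep (t u : List Char) (h : ' ' ∉ t) :
    pvSplit1 (t ++ ' ' :: u) = t :: pvSplit1 u := by
  induction t with
  | nil => simp [pvSplit1]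
  | cons c t' ih =>
      have hc : ¬ c = ' ' := by intro hc; exact h (by simp [hc])
      simp [pvSplit1, hc, ih (by intro hm; exact h (by simp [hm]))]

theorem pvSplit1_flatten (cs : List Char) :
    (pvSplit1 cs).flatten = cs.filter (fun c => !(c == ' ')) := by
  induction cs with
  | nil => simp [pvSplit1]
  | cons c rest ih =>
      by_cases hc : c = ' '
      · simp [pvSplit1, hc, ih]
      · obtain ⟨a, tl, hs⟩ : ∃ a tl, pvSplit1 rest = a :: tl := by
          cases hps : pvSplit1 rest with
          | nil => exact absurd hps (pvSplit1_ne_nil rest)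
          | cons a tl => exact ⟨a, tl, rfl⟩
        simp [pvSplit1, hc, hs] at *
        simpa [hs] using ih

theorem pv_mem_split1 (cs : List Char) (c : Char) (hc : c ≠ ' ') :
    (∃ t ∈ pvSplit1 cs, c ∈ t) ↔ c ∈ cs := by
  rw [← List.mem_flatten, pvSplit1_flatten, List.mem_filter]
  simp [hc]

-- ---- A's fold picks the last token satisfying the predicate ----
theorem pv_foldl_pick (p : List Char → Bool) :
    ∀ (l : List (List Char)) (a : List Char),
      l.foldl (fun r t => if p t then t else r) a = (l.filter p).getLastD a := by
  intro l
  induction l with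
  | nil => intro a; rfl
  | cons hd tl ih =>
      intro a
      rw [List.foldl_cons, List.filter_cons]
      by_cases hp : p hd
      · rw [if_pos hp, if_pos hp, ih, List.getLastD_cons]
      · rw [if_neg hp, if_neg hp, ih]

theorem pv_getLastD_of_ne_nil {l : List (List Char)} (h : l ≠ []) (d d' : List Char) :
    l.getLastD d = l.getLastD d' := by
  rw [List.getLastD_eq_getLast?, List.getLastD_eq_getLast?,
    List.getLast?_eq_some_getLast h]
  rfl

-- ---- rfind on a singleton pattern ----
theorem pv_rfind_go_none (s : List Char) (c : Char) (n : Nat)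
    (h : ∀ j, j ≤ n → s[j]? ≠ some c) : PySem.Chars.rfind.go s [c] n = -1 := by
  induction n with
  | zero =>
      have : ¬ [c].isPrefixOf s = true := by
        rw [show s = s.drop 0 by simp, pv_isPrefixOf_drop]
        exact h 0 (by omega)
      simp [PySem.Chars.rfind.go, this]
  | succ n ih =>
      have hp : ¬ [c].isPrefixOf (s.drop (n+1)) = true := by
        rw [pv_isPrefixOf_drop]; exact h (n+1) (by omega)
      have : PySem.Chars.rfind.go s [c] (n+1)
          = if [c].isPrefixOf (s.drop (n+1)) then ((n:Int)+1) else PySem.Chars.rfind.go s [c] n := by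
        simp [PySem.Chars.rfind.go]
      rw [this]
      simp [hp, ih (fun j hj => h j (by omega))]

theorem pv_rfind_go_last (s : List Char) (c : Char) (j : Nat)
    (hj : s[j]? = some c) (hmax : ∀ k, j < k → s[k]? ≠ some c) :
    ∀ n, j ≤ n → PySem.Chars.rfind.go s [c] n = (j : Int) := by
  intro n
  induction n with
  | zero =>
      intro hn
      have hj0 : j = 0 := by omega
      subst hj0
      have : [c].isPrefixOf s = true := by
        rw [show s = s.drop 0 by simp, pv_isPrefixOf_drop]; exact hj
      simp [PySem.Chars.rfind.go, this]
  | succ n ih =>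
      intro hn
      have heq : PySem.Chars.rfind.go s [c] (n+1)
          = if [c].isPrefixOf (s.drop (n+1)) then ((n:Int)+1) else PySem.Chars.rfind.go s [c] n := by
        simp [PySem.Chars.rfind.go]
      by_cases hc : j = n + 1
      · subst hc
        have : [c].isPrefixOf (s.drop (n+1)) = true := by rw [pv_isPrefixOf_drop]; exact hj
        rw [heq]; simp [this]
      · have hjn : j ≤ n := by omega
        have : ¬ [c].isPrefixOf (s.drop (n+1)) = true := by
          rw [pv_isPrefixOf_drop]; exact hmax (n+1) (by omega)
        rw [heq]; simp [this, ih hjn]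

theorem pv_rfind_not_mem (s : List Char) (c : Char) (h : c ∉ s) :
    PySem.Chars.rfind s [c] = -1 := by
  unfold PySem.Chars.rfind
  apply pv_rfind_go_none
  intro j _ hj
  exact h (by
    obtain ⟨hlt, he⟩ := List.getElem?_eq_some_iff.1 hj
    exact he ▸ List.getElem_mem hlt)

theorem pv_rfind_eq (s : List Char) (c : Char) (j : Nat)
    (hj : s[j]? = some c) (hmax : ∀ k, j < k → s[k]? ≠ some c) :
    PySem.Chars.rfind s [c] = (j : Int) := by
  unfold PySem.Chars.rfind
  have hlt : j < s.length := (List.getElem?_eq_some_iff.1 hj).1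
  exact pv_rfind_go_last s c j hj hmax s.length (by omega)

theorem pv_last_exists (s : List Char) (c : Char) (h : c ∈ s) :
    ∃ j : Nat, s[j]? = some c ∧ ∀ k, j < k → s[k]? ≠ some c := by
  classical
  obtain ⟨m, hm, he⟩ := List.mem_iff_getElem.1 h
  set P : Nat → Prop := fun k => s[k]? = some c with hP
  have hPm : P m := by simp [hP, List.getElem?_eq_some_iff, hm, he]
  refine ⟨Nat.findGreatest P s.length, Nat.findGreatest_spec (by omega) hPm, ?_⟩
  intro k hk hkc
  by_cases hks : k ≤ s.length
  · exact (Nat.findGreatest_is_greatest hk hks) hkc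
  · have : k < s.length := (List.getElem?_eq_some_iff.1 hkc).1
    omega

theorem pv_rfind_mem (s : List Char) (c : Char) (h : c ∈ s) :
    ∃ j : Nat, PySem.Chars.rfind s [c] = (j : Int) ∧ j < s.length ∧
      s[j]? = some c ∧ ∀ k, j < k → s[k]? ≠ some c := by
  obtain ⟨j, hj, hmax⟩ := pv_last_exists s c h
  exact ⟨j, pv_rfind_eq s c j hj hmax, (List.getElem?_eq_some_iff.1 hj).1, hj, hmax⟩

theorem pv_rfind_append_mem (w u : List Char) (c : Char) (h : c ∈ u) :
    PySem.Chars.rfind (w ++ u) [c] = (w.length : Int) + PySem.Chars.rfind u [c] := by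
  obtain ⟨j, hr, hjl, hj, hmax⟩ := pv_rfind_mem u c h
  rw [hr]
  have h1 : (w ++ u)[w.length + j]? = some c := by
    rw [List.getElem?_append_right (by omega)]
    simpa using hj
  have h2 : ∀ k, w.length + j < k → (w ++ u)[k]? ≠ some c := by
    intro k hk
    rw [List.getElem?_append_right (by omega)]
    exact hmax (k - w.length) (by omega)
  rw [pv_rfind_eq (w ++ u) c (w.length + j) h1 h2]
  push_cast; ring

theorem pv_rfind_append_not_mem (w u : List Char) (c : Char) (h : c ∉ u) :
    PySem.Chars.rfind (w ++ u) [c] = PySem.Chars.rfind w [c] := by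
  by_cases hw : c ∈ w
  · obtain ⟨j, hr, hjl, hj, hmax⟩ := pv_rfind_mem w c hw
    rw [hr]
    have h1 : (w ++ u)[j]? = some c := by
      rw [List.getElem?_append_left hjl]; exact hj
    have h2 : ∀ k, j < k → (w ++ u)[k]? ≠ some c := by
      intro k hk
      by_cases hkw : k < w.length
      · rw [List.getElem?_append_left hkw]; exact hmax k hk
      · rw [List.getElem?_append_right (by omega)]
        intro hc
        exact h (by
          obtain ⟨hlt, he⟩ := List.getElem?_eq_some_iff.1 hc
          exact he ▸ List.getElem_mem hlt)
    exact pv_rfind_eq (w ++ u) c j h1 h2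
  · rw [pv_rfind_not_mem w c hw]
    exact pv_rfind_not_mem (w ++ u) c (by simp [hw, h])

-- ---- find on a singleton pattern ----
theorem pv_find_not_mem (s : List Char) (c : Char) (h : c ∉ s) :
    PySem.Chars.find s [c] = -1 := by
  rw [PySem.Chars.find_eq_neg_one_iff, pv_infix_singleton]; exact h

theorem pv_find_eq (s : List Char) (c : Char) (j : Nat)
    (hj : s[j]? = some c) (hmin : ∀ k, k < j → s[k]? ≠ some c) :
    PySem.Chars.find s [c] = (j : Int) := by
  have hmem : c ∈ s := by
    obtain ⟨hlt, he⟩ := List.getElem?_eq_some_iff.1 hj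
    exact he ▸ List.getElem_mem hlt
  have h0 : 0 ≤ PySem.Chars.find s [c] := by
    rw [PySem.Chars.find_nonneg_iff, pv_infix_singleton]; exact hmem
  obtain ⟨hp, hmn⟩ := PySem.Chars.find_spec h0
  have hfp : s[(PySem.Chars.find s [c]).toNat]? = some c := by
    rw [← List.head?_drop, ← pv_prefix_singleton]; exact hp
  have e1 : ¬ (PySem.Chars.find s [c]).toNat < j := fun hlt => hmin _ hlt hfp
  have e2 : ¬ j < (PySem.Chars.find s [c]).toNat := by
    intro hlt
    exact hmn j hlt (by rw [pv_prefix_singleton, List.head?_drop]; exact hj)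
  have : (PySem.Chars.find s [c]).toNat = j := by omega
  omega

theorem pv_find_first_sep (v u : List Char) (h : ' ' ∉ v) :
    PySem.Chars.find (v ++ ' ' :: u) [' '] = (v.length : Int) := by
  apply pv_find_eq
  · rw [List.getElem?_append_right (by omega)]; simp
  · intro k hk
    rw [List.getElem?_append_left hk]
    intro hc
    exact h (by
      obtain ⟨hlt, he⟩ := List.getElem?_eq_some_iff.1 hc
      exact he ▸ List.getElem_mem hlt)

-- ---- rfindFrom / findFrom with natural bounds ----
theorem pv_rfindFrom_zero (s sub : List Char) (i : Nat) (hn : (i : Int) ≤ s.length) :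
    PySem.Chars.rfindFrom s sub 0 (some (i : Int)) = PySem.Chars.rfind (s.take i) sub := by
  simp only [PySem.Chars.rfindFrom]
  norm_num [hn]
  have hi : i ≤ s.length := by exact_mod_cast hn
  have h1 : ¬ (s.length < i) := by omega
  have h2 : ¬ ((i : Int) < 0) := by omega
  simp [h1, h2, Int.toNat_natCast]
  exact fun h => h.symm

theorem pv_findFrom_nat (s sub : List Char) (i : Nat) (hn : (i : Int) ≤ s.length) :
    PySem.Chars.findFrom s sub (i : Int) none
      = (if PySem.Chars.find (s.drop i) sub = -1 then -1
         else (i : Int) + PySem.Chars.find (s.drop i) sub) := by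
  simp only [PySem.Chars.findFrom]
  norm_num [hn]
  have h2 : ¬ ((i : Int) < 0) := by omega
  have h3 : ¬ ((s.length : Int) < (i : Int)) := by omega
  simp [h2, h3, Int.toNat_natCast]

-- ---- the two list-level algorithms ----
def pvLastTok (cs : List Char) : List Char :=
  ((pvSplit1 cs).filter (fun t => PySem.Chars.isIn ['-'] t)).getLastD []

def pvB (cs : List Char) : List Char :=
  let i := PySem.Chars.rfind cs ['-']
  if i = -1 then []
  else
    let start := PySem.Chars.rfindFrom cs [' '] 0 (some i) + 1
    let stop := PySem.Chars.findFrom cs [' '] i none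
    if stop = -1 then PySem.Chars.slice cs (some start) none
    else PySem.Chars.slice cs (some start) (some stop)

theorem pv_alt_eq (s : String) : get_affinity_alt s = String.mk (pvB s.toList) := by
  unfold get_affinity_alt pvB
  dsimp only
  split
  · rfl
  · split <;> rfl

-- ---- B-side case computations ----
theorem pvB_of (cs : List Char) (j : Nat) (hr : PySem.Chars.rfind cs ['-'] = (j : Int)) :
    pvB cs =
      (if PySem.Chars.findFrom cs [' '] (j : Int) none = -1 then
        PySem.Chars.slice cs (some (PySem.Chars.rfindFrom cs [' '] 0 (some (j : Int)) + 1)) none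
      else
        PySem.Chars.slice cs (some (PySem.Chars.rfindFrom cs [' '] 0 (some (j : Int)) + 1))
          (some (PySem.Chars.findFrom cs [' '] (j : Int) none))) := by
  simp only [pvB, hr]
  rw [if_neg (by omega : ¬ ((j : Int) = -1))]

theorem pvB_no_sep (cs : List Char) (h : ' ' ∉ cs) :
    pvB cs = if '-' ∈ cs then cs else [] := by
  by_cases hd : '-' ∈ cs
  · obtain ⟨j, hr, hjl, hj, hmax⟩ := pv_rfind_mem cs '-' hd
    have hstart : PySem.Chars.rfindFrom cs [' '] 0 (some (j : Int)) = -1 := by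
      rw [pv_rfindFrom_zero cs [' '] j (by omega)]
      exact pv_rfind_not_mem _ ' ' (fun hm => h (List.mem_of_mem_take hm))
    have hstop : PySem.Chars.findFrom cs [' '] (j : Int) none = -1 := by
      rw [pv_findFrom_nat cs [' '] j (by omega)]
      rw [pv_find_not_mem _ ' ' (fun hm => h (List.mem_of_mem_drop hm))]
      simp
    rw [pvB_of cs j hr, hstart, hstop, if_pos rfl, if_pos hd,
      PySem.Chars.slice_eq_listSlice,
      PySem.List.slice_from cs (by norm_num : (0:Int) ≤ -1 + 1)]
    norm_num
  · rw [show pvB cs = [] from by simp [pvB, pv_rfind_not_mem cs '-' hd], if_neg hd]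

theorem pv_take_append_long (w u : List Char) (k : Nat) :
    List.take (w.length + k) (w ++ u) = w ++ List.take k u := by
  rw [List.take_append, List.take_of_length_le (by omega)]
  congr 1
  congr 1
  omega

theorem pv_drop_append_long (w u : List Char) (k : Nat) :
    List.drop (w.length + k) (w ++ u) = List.drop k u := by
  rw [List.drop_append, List.drop_eq_nil_of_le (by omega)]
  simp only [List.nil_append]
  congr 1
  omega

theorem pvB_dash_right (t u : List Char) (hd : '-' ∈ u) :
    pvB (t ++ ' ' :: u) = pvB u := by
  have hw : t ++ ' ' :: u = (t ++ [' ']) ++ u := by simp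
  set w : List Char := t ++ [' '] with hwdef
  rw [hw]
  obtain ⟨j, hru, hjl, hju, hmaxu⟩ := pv_rfind_mem u '-' hd
  have hwlen : w.length = t.length + 1 := by simp [hwdef]
  have hlen : (w ++ u).length = w.length + u.length := by simp
  have hr : PySem.Chars.rfind (w ++ u) ['-'] = ((w.length + j : Nat) : Int) := by
    rw [pv_rfind_append_mem w u '-' hd, hru]; push_cast; ring
  -- start positions
  have htk : List.take (w.length + j) (w ++ u) = w ++ List.take j u :=
    pv_take_append_long w u j
  have hstart_cs : PySem.Chars.rfindFrom (w ++ u) [' '] 0 (some ((w.length + j : Nat) : Int))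
      = PySem.Chars.rfind (w ++ List.take j u) [' '] := by
    rw [pv_rfindFrom_zero (w ++ u) [' '] (w.length + j) (by rw [hlen]; push_cast; omega), htk]
  have hstart_u : PySem.Chars.rfindFrom u [' '] 0 (some (j : Int))
      = PySem.Chars.rfind (List.take j u) [' '] :=
    pv_rfindFrom_zero u [' '] j (by omega)
  -- a unified Nat value for each start
  obtain ⟨a, ha_cs, ha_u⟩ : ∃ a : Nat,
      PySem.Chars.rfind (w ++ List.take j u) [' '] + 1 = ((w.length + a : Nat) : Int) ∧
      PySem.Chars.rfind (List.take j u) [' '] + 1 = ((a : Nat) : Int) := by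
    by_cases hsv : ' ' ∈ List.take j u
    · obtain ⟨a, hra, hal, hga, hmaxa⟩ := pv_rfind_mem (List.take j u) ' ' hsv
      refine ⟨a + 1, ?_, ?_⟩
      · rw [pv_rfind_append_mem w _ ' ' hsv, hra]; push_cast; ring
      · rw [hra]; push_cast; ring
    · refine ⟨0, ?_, ?_⟩
      · rw [pv_rfind_append_not_mem w _ ' ' hsv, hwdef,
          pv_rfind_append_mem t [' '] ' ' (by simp),
          show PySem.Chars.rfind [' '] [' '] = 0 from by decide]
        rw [← hwdef, hwlen]; push_cast; try ring
      · rw [pv_rfind_not_mem _ ' ' hsv]; norm_num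
  -- stop positions
  have hdr : List.drop (w.length + j) (w ++ u) = List.drop j u :=
    pv_drop_append_long w u j
  have hstop_cs : PySem.Chars.findFrom (w ++ u) [' '] ((w.length + j : Nat) : Int) none
      = (if PySem.Chars.find (List.drop j u) [' '] = -1 then -1
         else ((w.length + j : Nat) : Int) + PySem.Chars.find (List.drop j u) [' ']) := by
    rw [pv_findFrom_nat (w ++ u) [' '] (w.length + j) (by rw [hlen]; push_cast; omega), hdr]
  have hstop_u : PySem.Chars.findFrom u [' '] (j : Int) none
      = (if PySem.Chars.find (List.drop j u) [' '] = -1 then -1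
         else (j : Int) + PySem.Chars.find (List.drop j u) [' ']) :=
    pv_findFrom_nat u [' '] j (by omega)
  rw [pvB_of (w ++ u) (w.length + j) hr, pvB_of u j hru,
    hstart_cs, hstart_u, hstop_cs, hstop_u, ha_cs, ha_u]
  by_cases hf : PySem.Chars.find (List.drop j u) [' '] = -1
  · rw [if_pos hf, if_pos hf, if_pos rfl, if_pos rfl,
      PySem.Chars.slice_eq_listSlice, PySem.Chars.slice_eq_listSlice,
      PySem.List.slice_from_natCast, PySem.List.slice_from_natCast,
      pv_drop_append_long w u a]
  · have hf0 : 0 ≤ PySem.Chars.find (List.drop j u) [' '] := by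
      have := PySem.Chars.neg_one_le_find (List.drop j u) [' ']
      omega
    set f : Int := PySem.Chars.find (List.drop j u) [' '] with hfdef
    have hb : f = ((f.toNat : Nat) : Int) := by omega
    rw [if_neg hf, if_neg hf]
    have hne1 : ¬ (((w.length + j : Nat) : Int) + f = -1) := by omega
    have hne2 : ¬ ((j : Int) + f = -1) := by omega
    rw [if_neg hne1, if_neg hne2,
      PySem.Chars.slice_eq_listSlice, PySem.Chars.slice_eq_listSlice]
    have e1 : ((w.length + j : Nat) : Int) + f = ((w.length + j + f.toNat : Nat) : Int) := by
      push_cast; omega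
    have e2 : ((j : Int)) + f = ((j + f.toNat : Nat) : Int) := by push_cast; omega
    rw [e1, e2, PySem.List.slice_natCast, PySem.List.slice_natCast,
      pv_drop_append_long w u a]
    congr 1
    omega

theorem pvB_dash_left (t u : List Char) (ht : ' ' ∉ t) (hdt : '-' ∈ t) (hdu : '-' ∉ u) :
    pvB (t ++ ' ' :: u) = t := by
  obtain ⟨j, hrt, hjl, hj, hmax⟩ := pv_rfind_mem t '-' hdt
  have hlen : (t ++ ' ' :: u).length = t.length + 1 + u.length := by simp; omega
  have hr : PySem.Chars.rfind (t ++ ' ' :: u) ['-'] = (j : Int) := by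
    rw [pv_rfind_append_not_mem t (' ' :: u) '-' (by simp [hdu]), hrt]
  have htake : List.take j (t ++ ' ' :: u) = List.take j t := by
    rw [List.take_append]
    have hz : j - t.length = 0 := by omega
    simp [hz]
  have hstart : PySem.Chars.rfindFrom (t ++ ' ' :: u) [' '] 0 (some (j : Int)) = -1 := by
    rw [pv_rfindFrom_zero _ [' '] j (by rw [hlen]; push_cast; omega), htake]
    exact pv_rfind_not_mem _ ' ' (fun hm => ht (List.mem_of_mem_take hm))
  have hdropj : List.drop j (t ++ ' ' :: u) = List.drop j t ++ ' ' :: u := by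
    rw [List.drop_append]
    have hz : j - t.length = 0 := by omega
    simp [hz]
  have hstop : PySem.Chars.findFrom (t ++ ' ' :: u) [' '] (j : Int) none = (t.length : Int) := by
    rw [pv_findFrom_nat _ [' '] j (by rw [hlen]; push_cast; omega), hdropj,
      pv_find_first_sep (List.drop j t) u (fun hm => ht (List.mem_of_mem_drop hm))]
    rw [List.length_drop]
    have hne : ¬ (((t.length - j : Nat) : Int) = -1) := by omega
    rw [if_neg hne]
    push_cast [Nat.cast_sub (le_of_lt hjl)]
    ring
  rw [pvB_of _ j hr, hstop, if_neg (by omega : ¬ ((t.length : Int) = -1)), hstart]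
  have h01 : (-1 : Int) + 1 = ((0 : Nat) : Int) := by norm_num
  have h02 : (t.length : Int) = ((t.length : Nat) : Int) := rfl
  rw [h01, PySem.Chars.slice_eq_listSlice, PySem.List.slice_natCast]
  simp only [List.drop_zero, Nat.sub_zero]
  exact List.take_left ..

theorem pvB_no_dash (t u : List Char) (hdt : '-' ∉ t) (hdu : '-' ∉ u) :
    pvB (t ++ ' ' :: u) = [] := by
  have : '-' ∉ t ++ ' ' :: u := by simp [hdt, hdu]
  simp [pvB, pv_rfind_not_mem _ '-' this]

-- ---- A-side case computations ----
theorem pvLastTok_no_sep (cs : List Char) (h : ' ' ∉ cs) :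
    pvLastTok cs = if '-' ∈ cs then cs else [] := by
  unfold pvLastTok
  rw [pvSplit1_no_sep cs h, List.filter_cons]
  by_cases hd : '-' ∈ cs
  · rw [if_pos ((pv_isIn_singleton '-' cs).2 hd), if_pos hd]
    rfl
  · have hni : ¬ PySem.Chars.isIn ['-'] cs = true := fun hc => hd ((pv_isIn_singleton '-' cs).1 hc)
    rw [if_neg hni, if_neg hd]
    rfl

theorem pv_filter_split1_ne_nil (u : List Char) (hd : '-' ∈ u) :
    (pvSplit1 u).filter (fun t => PySem.Chars.isIn ['-'] t) ≠ [] := by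
  intro hnil
  obtain ⟨t, htm, htc⟩ := (pv_mem_split1 u '-' (by decide)).2 hd
  have := List.filter_eq_nil_iff.1 hnil t htm
  exact this ((pv_isIn_singleton '-' t).2 htc)

theorem pv_filter_split1_nil (u : List Char) (hd : '-' ∉ u) :
    (pvSplit1 u).filter (fun t => PySem.Chars.isIn ['-'] t) = [] := by
  rw [List.filter_eq_nil_iff]
  intro t htm hc
  exact hd ((pv_mem_split1 u '-' (by decide)).1 ⟨t, htm, (pv_isIn_singleton '-' t).1 hc⟩)

theorem pvLastTok_dash_right (t u : List Char) (ht : ' ' ∉ t) (hd : '-' ∈ u) :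
    pvLastTok (t ++ ' ' :: u) = pvLastTok u := by
  unfold pvLastTok
  rw [pvSplit1_append_sep t u ht, List.filter_cons]
  have hne := pv_filter_split1_ne_nil u hd
  split
  · rw [List.getLastD_cons, pv_getLastD_of_ne_nil hne t []]
  · rfl

theorem pvLastTok_dash_left (t u : List Char) (ht : ' ' ∉ t) (hdt : '-' ∈ t) (hdu : '-' ∉ u) :
    pvLastTok (t ++ ' ' :: u) = t := by
  unfold pvLastTok
  rw [pvSplit1_append_sep t u ht, List.filter_cons, pv_filter_split1_nil u hdu]
  simp [(pv_isIn_singleton '-' t).2 hdt]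

theorem pvLastTok_no_dash (t u : List Char) (ht : ' ' ∉ t) (hdt : '-' ∉ t) (hdu : '-' ∉ u) :
    pvLastTok (t ++ ' ' :: u) = [] := by
  unfold pvLastTok
  rw [pvSplit1_append_sep t u ht, List.filter_cons, pv_filter_split1_nil u hdu]
  have : ¬ PySem.Chars.isIn ['-'] t = true := fun hc => hdt ((pv_isIn_singleton '-' t).1 hc)
  simp [this]

-- ---- main equivalence on lists ----
theorem pv_decompose (cs : List Char) (h : ' ' ∈ cs) :
    ∃ t u, cs = t ++ ' ' :: u ∧ ' ' ∉ t := by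
  classical
  set p : Char → Bool := fun c => !(c == ' ') with hp
  have hdw : cs.dropWhile p ≠ [] := by
    intro hnil
    have := List.dropWhile_eq_nil_iff.1 hnil ' ' h
    simp [hp] at this
  obtain ⟨d, rest, hdr⟩ : ∃ d rest, cs.dropWhile p = d :: rest := by
    cases hd : cs.dropWhile p with
    | nil => exact absurd hd hdw
    | cons d rest => exact ⟨d, rest, rfl⟩
  have hd' : d = ' ' := by
    have h1 := List.head_dropWhile_not p hdw
    have hh := List.head?_eq_head hdw
    have hh2 : (List.dropWhile p cs).head? = some d := by rw [hdr]; rfl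
    have hde : (List.dropWhile p cs).head hdw = d := Option.some.inj (hh.symm.trans hh2)
    rw [hde] at h1
    simpa [hp] using h1
  refine ⟨cs.takeWhile p, rest, ?_, ?_⟩
  · conv_lhs => rw [← List.takeWhile_append_dropWhile (p := p) (l := cs)]
    rw [hdr, hd']
  · intro hm
    have := List.mem_takeWhile_imp hm
    simp [hp] at this

theorem pv_main (cs : List Char) : pvLastTok cs = pvB cs := by
  have key : ∀ n, ∀ cs : List Char, cs.length ≤ n → pvLastTok cs = pvB cs := by
    intro n
    induction n with
    | zero =>
        intro cs hlen
        have : cs = [] := List.eq_nil_of_length_eq_zero (by omega)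
        subst this
        decide
    | succ n ih =>
        intro cs hlen
        by_cases hsp : ' ' ∈ cs
        · obtain ⟨t, u, rfl, ht⟩ := pv_decompose cs hsp
          have hu : u.length ≤ n := by
            have h2 : (t ++ ' ' :: u).length = t.length + 1 + u.length := by
              simp [List.length_append]; omega
            omega
          by_cases hdu : '-' ∈ u
          · rw [pvLastTok_dash_right t u ht hdu, pvB_dash_right t u hdu]
            exact ih u hu
          · by_cases hdt : '-' ∈ t
            · rw [pvLastTok_dash_left t u ht hdt hdu, pvB_dash_left t u ht hdt hdu]
            · rw [pvLastTok_no_dash t u ht hdt hdu, pvB_no_dash t u hdt hdu]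
        · rw [pvLastTok_no_sep cs hsp, pvB_no_sep cs hsp]
  exact key cs.length cs (le_refl _)

-- ===== VERDICT (by name: the statement is the Claim_ definition above) =====
theorem get_affinity_spec : Claim_equal_get_affinity := by
  intro s _
  unfold Spec_get_affinity get_affinity
  rw [pv_alt_eq, pv_splitOn_eq, pv_foldl_pick]
  exact congrArg String.mk (pv_main s.toList)
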